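-- pv_equiv track=rewrite | github.com/aristotle0x01/Grokking-the-Coding-Interview-Pattern | 1. Pattern Sliding Window/Longest Subarray with Ones after Replacement (hard).py | replace_zero_to_find_longest_continuous_ones
-- ===== SOURCE A (Python) =====
-- def replace_zero_to_find_longest_continuous_ones(array, k):
--     wnd_start = 0
--     max_continuous_ones = 0
--
--     n = len(array)
--     while wnd_start < n:
--         while wnd_start < n and array[wnd_start] == 1:
--             wnd_start = wnd_start + 1
--
--         if wnd_start >= n:
--             break
--
--         temp = array.copy()
--
--         replaced = 0
--         for i in range(wnd_start, n):
--             if temp[i] == 0 and replaced < k: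
--                 temp[i] = 1
--                 replaced = replaced + 1
--                 if replaced == k:
--                     break
--
--         loop_count = count_max_continuous_ones(temp)
--         if loop_count > max_continuous_ones:
--             max_continuous_ones = loop_count
--
--         wnd_start = wnd_start + 1
--
--     return max_continuous_ones
--
-- def count_max_continuous_ones(a):
--     max = 0
--     temp = 0
--     for e in a:
--         if e == 1:
--             temp = temp + 1
--         else:
--             if temp > max:
--                 max = temp
--             temp = 0
--
--     if temp > max:
--         max = temp
--     return max
-- ===== SOURCE B (Python) =====
-- def replace_zero_to_find_longest_continuous_ones(array, k):
--     best = 0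
--     for start in range(len(array)):
--         budget = k
--         length = 0
--         for x in array[start:]:
--             if x == 1:
--                 length += 1
--             elif x == 0 and budget > 0:
--                 budget -= 1
--                 length += 1
--             else:
--                 break
--         if length > best:
--             best = length
--     return best
-- ===== Notes on version B (the rewrite author's own statement) =====
-- stated objective: faster
-- what changed: For each start B directly scans forward with a zero-replacement budget and stops at the first unreplaceable element, keeping only the best scan length; A instead, for each non-one start, copies the whole array, greedily rewrites up to k zeros, and recounts the maximal run of ones of the entire modified array.
-- intended difference: On nonempty all-ones arrays A returns 0 (its outer loop skips the ones and breaks before ever counting a run) while B returns len(array), the intended length of the longest window of ones. — e.g. on replace_zero_to_find_longest_continuous_ones([1], 0): A returns 0, B returns 1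
import Mathlib
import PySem

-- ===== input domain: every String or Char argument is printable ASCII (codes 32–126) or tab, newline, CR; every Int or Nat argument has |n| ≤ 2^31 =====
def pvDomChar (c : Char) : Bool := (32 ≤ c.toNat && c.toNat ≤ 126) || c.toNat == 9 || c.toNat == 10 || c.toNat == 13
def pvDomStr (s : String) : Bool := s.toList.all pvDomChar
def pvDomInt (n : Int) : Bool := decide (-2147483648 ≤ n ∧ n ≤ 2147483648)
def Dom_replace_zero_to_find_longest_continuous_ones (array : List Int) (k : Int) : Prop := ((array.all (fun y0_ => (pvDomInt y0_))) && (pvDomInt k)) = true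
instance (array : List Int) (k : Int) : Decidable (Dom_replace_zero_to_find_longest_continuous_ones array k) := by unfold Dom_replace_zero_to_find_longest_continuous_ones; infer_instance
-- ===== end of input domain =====

-- B changes the algorithm: a direct budgeted forward scan from every start instead of
-- A's copy-the-array / greedily-replace-k-zeros / recount-the-whole-array pass per start
-- (objective: simpler); on nonempty all-ones arrays A returns 0, B the intended length (see D_).

-- ===== PORT A =====
-- count_max_continuous_ones
def pvCountMax (a : List Int) : Int :=
  let s := a.foldl (fun (st : Int × Int) e =>
    if e = 1 then (st.1, st.2 + 1)
    else (if st.2 > st.1 then st.2 else st.1, 0)) (0, 0)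
  if s.2 > s.1 then s.2 else s.1

-- inner `while wnd_start < n and array[wnd_start] == 1` loop
def pvSkip (array : List Int) (w : Nat) : Nat :=
  if w < array.length ∧ array.getD w 0 = 1 then pvSkip array (w + 1) else w
termination_by array.length - w
decreasing_by omega

theorem pvSkip_ge (array : List Int) (w : Nat) : w ≤ pvSkip array w := by
  fun_induction pvSkip array w with
  | case1 w h ih => omega
  | case2 w h => omega

-- the `for i in range(wnd_start, n)` replacement loop (temp.length = n throughout)
def pvReplace (temp : List Int) (i : Nat) (replaced k : Int) : List Int :=
  if h : i < temp.length then
    if temp.getD i 0 = 0 ∧ replaced < k then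
      let t := temp.set i 1
      if replaced + 1 = k then t else pvReplace t (i + 1) (replaced + 1) k
    else pvReplace temp (i + 1) replaced k
  else temp
termination_by temp.length - i
decreasing_by
  · simp only [List.length_set]; omega
  · omega

-- outer `while wnd_start < n` loop
def pvOuter (array : List Int) (k : Int) (w : Nat) (mx : Int) : Int :=
  if h : w < array.length then
    let w' := pvSkip array w
    if array.length ≤ w' then mx
    else
      let c := pvCountMax (pvReplace array w' 0 k)
      pvOuter array k (w' + 1) (if c > mx then c else mx)
  else mx
termination_by array.length - w
decreasing_by
  have := pvSkip_ge array w
  omega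

def replace_zero_to_find_longest_continuous_ones (array : List Int) (k : Int) : Int :=
  pvOuter array k 0 0

-- ===== PORT B =====
-- inner `for x in array[start:]` scan with budget and break
def pvScan (xs : List Int) (budget len : Int) : Int :=
  match xs with
  | [] => len
  | x :: t =>
    if x = 1 then pvScan t budget (len + 1)
    else if x = 0 ∧ 0 < budget then pvScan t (budget - 1) (len + 1)
    else len

def replace_zero_to_find_longest_continuous_ones_alt (array : List Int) (k : Int) : Int :=
  (List.range array.length).foldl
    (fun best start =>
      let len := pvScan (array.drop start) k 0
      if len > best then len else best) 0

-- ===== PRECONDITION & SPEC =====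
-- On nonempty all-ones arrays A returns 0 (its outer loop skips the ones and breaks before
-- ever counting a run) while B returns the array length, the intended answer.
def D_replace_zero_to_find_longest_continuous_ones (array : List Int) (k : Int) : Prop :=
  array ≠ [] ∧ ∀ x ∈ array, x = 1
instance (array : List Int) (k : Int) : Decidable (D_replace_zero_to_find_longest_continuous_ones array k) := by
  unfold D_replace_zero_to_find_longest_continuous_ones; infer_instance

def Spec_replace_zero_to_find_longest_continuous_ones (array : List Int) (k : Int) (out : Int) : Prop :=
  ¬ D_replace_zero_to_find_longest_continuous_ones array k →
    out = replace_zero_to_find_longest_continuous_ones_alt array k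
instance (array : List Int) (k : Int) (out : Int) : Decidable (Spec_replace_zero_to_find_longest_continuous_ones array k out) := by
  unfold Spec_replace_zero_to_find_longest_continuous_ones; infer_instance

def pvDiffWitness_replace_zero_to_find_longest_continuous_ones : List Int × Int := ([1], 0)
def pvDiffWitnessOut_replace_zero_to_find_longest_continuous_ones : Int × Int := (0, 1)

-- ===== CLAIM (what is proved, stated in full; the proofs are below) =====
def Claim_unchanged_replace_zero_to_find_longest_continuous_ones : Prop := ∀ (array : List Int) (k : Int), Dom_replace_zero_to_find_longest_continuous_ones array k → Spec_replace_zero_to_find_longest_continuous_ones array k (replace_zero_to_find_longest_continuous_ones array k)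
def Claim_changed_replace_zero_to_find_longest_continuous_ones : Prop := Dom_replace_zero_to_find_longest_continuous_ones (pvDiffWitness_replace_zero_to_find_longest_continuous_ones.1) (pvDiffWitness_replace_zero_to_find_longest_continuous_ones.2) ∧ D_replace_zero_to_find_longest_continuous_ones (pvDiffWitness_replace_zero_to_find_longest_continuous_ones.1) (pvDiffWitness_replace_zero_to_find_longest_continuous_ones.2) ∧ replace_zero_to_find_longest_continuous_ones (pvDiffWitness_replace_zero_to_find_longest_continuous_ones.1) (pvDiffWitness_replace_zero_to_find_longest_continuous_ones.2) = pvDiffWitnessOut_replace_zero_to_find_longest_continuous_ones.1 ∧ replace_zero_to_find_longest_continuous_ones_alt (pvDiffWitness_replace_zero_to_find_longest_continuous_ones.1) (pvDiffWitness_replace_zero_to_find_longest_continuous_ones.2) = pvDiffWitnessOut_replace_zero_to_find_longest_continuous_ones.2 ∧ pvDiffWitnessOut_replace_zero_to_find_longest_continuous_ones.1 ≠ pvDiffWitnessOut_replace_zero_to_find_longest_continuous_ones.2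
def Claim_exact_replace_zero_to_find_longest_continuous_ones : Prop := ∀ (array : List Int) (k : Int), Dom_replace_zero_to_find_longest_continuous_ones array k → D_replace_zero_to_find_longest_continuous_ones array k → replace_zero_to_find_longest_continuous_ones array k ≠ replace_zero_to_find_longest_continuous_ones_alt array k

-- ===== LEMMAS AND PROOFS =====

-- `Good array k m`: the array has a window (contiguous infix) of length m consisting of
-- ones and at most max(k,0) zeros — i.e. m ones are achievable by replacing ≤ k zeros.
def Good (array : List Int) (k : Int) (m : Nat) : Prop :=
  ∃ s : List Int, s <:+: array ∧ s.length = m ∧ (∀ x ∈ s, x = 0 ∨ x = 1) ∧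
    ((s.count 0 : Int) ≤ max k 0)

-- ---- B-side ----
def okLen : List Int → Int → Nat
  | [], _ => 0
  | x :: t, b =>
    if x = 1 then okLen t b + 1
    else if x = 0 ∧ 0 < b then okLen t (b - 1) + 1
    else 0

theorem pvScan_eq (xs : List Int) (b len : Int) : pvScan xs b len = len + (okLen xs b : Int) := by
  induction xs generalizing b len with
  | nil => simp [pvScan, okLen]
  | cons x t ih =>
    simp only [pvScan, okLen]
    split_ifs with h1 h2
    · rw [ih]; push_cast; ring
    · rw [ih]; push_cast; ring
    · simp

theorem okLen_prefix_good (t : List Int) (b : Int) :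
    ∃ s, s <+: t ∧ s.length = okLen t b ∧ (∀ x ∈ s, x = 0 ∨ x = 1) ∧
      ((s.count 0 : Int) ≤ max b 0) := by
  induction t generalizing b with
  | nil => exact ⟨[], by simp [okLen], rfl, by simp, by simp⟩
  | cons x t ih =>
    by_cases hx1 : x = 1
    · obtain ⟨s, hp, hl, hb, hc⟩ := ih b
      refine ⟨x :: s, List.cons_prefix_cons.2 ⟨rfl, hp⟩, ?_, ?_, ?_⟩
      · simp [okLen, hx1, hl]
      · intro y hy; rcases List.mem_cons.1 hy with rfl | hy
        · exact Or.inr hx1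
        · exact hb y hy
      · subst hx1; simpa using hc
    · by_cases hx0 : x = 0 ∧ 0 < b
      · obtain ⟨s, hp, hl, hb, hc⟩ := ih (b - 1)
        refine ⟨x :: s, List.cons_prefix_cons.2 ⟨rfl, hp⟩, ?_, ?_, ?_⟩
        · simp [okLen, hx1, hx0, hl]
        · intro y hy; rcases List.mem_cons.1 hy with rfl | hy
          · exact Or.inl hx0.1
          · exact hb y hy
        · obtain ⟨rfl, hbpos⟩ := hx0
          simp only [List.count_cons_self]
          push_cast
          omega
      · exact ⟨[], List.nil_prefix, by simp [okLen, hx1, hx0], by simp, by simp⟩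

theorem okLen_ge (s v : List Int) (b : Int) (hb : ∀ x ∈ s, x = 0 ∨ x = 1)
    (hc : (s.count 0 : Int) ≤ max b 0) : s.length ≤ okLen (s ++ v) b := by
  induction s generalizing b with
  | nil => simp
  | cons x s ih =>
    rcases hb x List.mem_cons_self with hx0 | hx1
    · subst hx0
      have hcnt : ((0 : Int) :: s).count 0 = s.count 0 + 1 := by simp
      have hbpos : 0 < b := by rw [hcnt] at hc; push_cast at hc; omega
      have hc' : (s.count 0 : Int) ≤ max (b - 1) 0 := by
        rw [hcnt] at hc; push_cast at hc; omega
      have := ih (fun y hy => hb y (List.mem_cons_of_mem _ hy)) (b := b - 1) hc'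
      simp only [List.cons_append, okLen, hbpos, and_true]
      split_ifs with h1 <;> simp_all <;> omega
    · subst hx1
      have hc' : (s.count 0 : Int) ≤ max b 0 := by
        have : ((1 : Int) :: s).count 0 = s.count 0 := by simp
        rw [this] at hc; exact hc
      have := ih (fun y hy => hb y (List.mem_cons_of_mem _ hy)) (b := b) hc'
      simp only [List.cons_append]
      simp [okLen]
      omega

theorem foldl_best_ge_acc (f : Nat → Int) (l : List Nat) (acc : Int) :
    acc ≤ l.foldl (fun best s => if f s > best then f s else best) acc := by
  induction l generalizing acc with
  | nil => simp
  | cons a l ih => exact le_trans (by dsimp only; split <;> omega) (ih _)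

theorem foldl_best_ge_mem (f : Nat → Int) (l : List Nat) (acc : Int) (s : Nat) (hs : s ∈ l) :
    f s ≤ l.foldl (fun best t => if f t > best then f t else best) acc := by
  induction l generalizing acc with
  | nil => cases hs
  | cons a l ih =>
    rcases List.mem_cons.1 hs with rfl | hs'
    · exact le_trans (by dsimp only; split <;> omega) (foldl_best_ge_acc f l _)
    · exact ih _ hs'

theorem alt_ge (array : List Int) (k : Int) (m : Nat) (h : Good array k m) :
    (m : Int) ≤ replace_zero_to_find_longest_continuous_ones_alt array k := by
  obtain ⟨s, hinf, hl, hb, hc⟩ := h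
  obtain ⟨u, v, huv⟩ := hinf
  rcases Nat.eq_zero_or_pos m with rfl | hm
  · simpa using foldl_best_ge_acc
      (fun start => pvScan (array.drop start) k 0) (List.range array.length) 0
  · have hmem : u.length ∈ List.range array.length := by
      rw [List.mem_range, ← huv]
      simp only [List.length_append]
      omega
    have hdrop : array.drop u.length = s ++ v := by
      rw [← huv, List.append_assoc, List.drop_left]
    have hval : pvScan (array.drop u.length) k 0 = ((okLen (s ++ v) k : Nat) : Int) := by
      rw [pvScan_eq, hdrop]; ring
    have hge : m ≤ okLen (s ++ v) k := hl ▸ okLen_ge s v k hb hc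
    calc (m : Int) ≤ (okLen (s ++ v) k : Int) := by exact_mod_cast hge
      _ = pvScan (array.drop u.length) k 0 := hval.symm
      _ ≤ _ := foldl_best_ge_mem _ _ 0 _ hmem

theorem good_zero (array : List Int) (k : Int) : Good array k 0 :=
  ⟨[], List.nil_infix, rfl, by simp, by simp⟩

theorem foldl_best_good (array : List Int) (k : Int) (f : Nat → Int) (l : List Nat) (acc : Int)
    (h : ∃ m, Good array k m ∧ acc = (m : Int))
    (hl : ∀ s ∈ l, ∃ m, Good array k m ∧ f s = (m : Int)) :
    ∃ m, Good array k m ∧ l.foldl (fun best t => if f t > best then f t else best) acc = (m : Int) := by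
  induction l generalizing acc with
  | nil => exact h
  | cons a l ih =>
    refine ih _ ?_ (fun s hs => hl s (List.mem_cons_of_mem _ hs))
    dsimp only; split
    · exact hl a List.mem_cons_self
    · exact h

theorem alt_good (array : List Int) (k : Int) :
    ∃ m, Good array k m ∧ replace_zero_to_find_longest_continuous_ones_alt array k = (m : Int) := by
  refine foldl_best_good array k _ _ 0 ⟨0, good_zero array k, rfl⟩ ?_
  intro start _
  obtain ⟨s, hp, hl, hb, hc⟩ := okLen_prefix_good (array.drop start) k
  refine ⟨okLen (array.drop start) k, ⟨s, ?_, hl, hb, hc⟩, by rw [pvScan_eq]; ring⟩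
  exact hp.isInfix.trans (array.drop_suffix start).isInfix

-- ---- A-side: greedy replacement, structurally ----
def greedy : List Int → Int → List Int
  | [], _ => []
  | x :: t, c => if x = 0 ∧ 0 < c then 1 :: greedy t (c - 1) else x :: greedy t c

theorem greedy_nonpos (t : List Int) (c : Int) (hc : c ≤ 0) : greedy t c = t := by
  induction t generalizing c with
  | nil => rfl
  | cons x t ih => simp [greedy, ih c hc]; intro _ h; omega

theorem getD_append_len (u v : List Int) (x d : Int) : (u ++ x :: v).getD u.length d = x := by
  rw [List.getD_eq_getElem?_getD, List.getElem?_append_right (le_refl _)]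
  simp

theorem set_append_len (u v : List Int) (x y : Int) : (u ++ x :: v).set u.length y = u ++ y :: v := by
  rw [List.set_append_right _ _ (le_refl _)]
  simp

theorem pvReplace_eq_greedy (w u : List Int) (r k : Int) :
    pvReplace (u ++ w) u.length r k = u ++ greedy w (k - r) := by
  induction w generalizing u r with
  | nil => rw [pvReplace]; simp [greedy]
  | cons x t ih =>
    rw [pvReplace]
    have hlt : u.length < (u ++ x :: t).length := by simp
    rw [dif_pos hlt, getD_append_len]
    by_cases hg : x = 0 ∧ r < k
    · rw [if_pos hg, set_append_len]
      by_cases hk : r + 1 = k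
      · rw [if_pos hk]
        have : greedy (x :: t) (k - r) = 1 :: t := by
          simp only [greedy, hg.1, true_and, if_pos (by omega : (0:Int) < k - r)]
          rw [greedy_nonpos t (k - r - 1) (by omega)]
        rw [this]
      · rw [if_neg hk]
        have h1 : u ++ (1 : Int) :: t = (u ++ [1]) ++ t := by simp
        have h2 : u.length + 1 = (u ++ [(1 : Int)]).length := by simp
        rw [h1, h2, ih (u ++ [1]) (r + 1)]
        simp only [greedy, hg.1, true_and, if_pos (by omega : (0:Int) < k - r)]
        have : k - (r + 1) = k - r - 1 := by ring
        simp [this]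
    · rw [if_neg hg]
      have h1 : u ++ x :: t = (u ++ [x]) ++ t := by simp
      have h2 : u.length + 1 = (u ++ [x]).length := by simp
      rw [h1, h2, ih (u ++ [x]) r]
      have : ¬ (x = 0 ∧ 0 < k - r) := by intro h; exact hg ⟨h.1, by omega⟩
      simp only [greedy, if_neg this]
      simp

theorem length_greedy (t : List Int) (c : Int) : (greedy t c).length = t.length := by
  induction t generalizing c with
  | nil => rfl
  | cons x t ih => simp only [greedy]; split <;> simp [ih]

def pvRel (x y : Int) : Prop := y = x ∨ (x = 0 ∧ y = 1)

theorem greedy_forall₂ (t : List Int) (c : Int) : List.Forall₂ pvRel t (greedy t c) := by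
  induction t generalizing c with
  | nil => exact List.Forall₂.nil
  | cons x t ih =>
    simp only [greedy]; split
    · rename_i h; exact List.Forall₂.cons (Or.inr ⟨h.1, rfl⟩) (ih _)
    · exact List.Forall₂.cons (Or.inl rfl) (ih _)

theorem greedy_changed_le (t : List Int) (c : Int) :
    ((t.zip (greedy t c)).countP (fun p => !(p.1 == p.2))) ≤ c.toNat := by
  induction t generalizing c with
  | nil => simp [greedy]
  | cons x t ih =>
    simp only [greedy]; split
    · rename_i h
      obtain ⟨rfl, hc⟩ := h
      have := ih (c - 1)
      simp [List.zip_cons_cons, List.countP_cons]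
      omega
    · have := ih c
      simp [List.zip_cons_cons, List.countP_cons]
      omega

theorem greedy_prefix_ones (w v : List Int) (c : Int) (hb : ∀ x ∈ w, x = 0 ∨ x = 1)
    (hc : (w.count 0 : Int) ≤ c) :
    greedy (w ++ v) c = w.map (fun _ => 1) ++ greedy v (c - (w.count 0 : Int)) := by
  induction w generalizing c with
  | nil => simp
  | cons x t ih =>
    rcases hb x List.mem_cons_self with rfl | rfl
    · have hcnt : ((0 : Int) :: t).count 0 = t.count 0 + 1 := by simp
      have hcpos : 0 < c := by rw [hcnt] at hc; push_cast at hc; omega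
      have hc' : (t.count 0 : Int) ≤ c - 1 := by rw [hcnt] at hc; push_cast at hc; omega
      simp only [List.cons_append, greedy]
      rw [if_pos (⟨trivial, hcpos⟩ : True ∧ 0 < c)]
      rw [ih (c - 1) (fun y hy => hb y (List.mem_cons_of_mem _ hy)) hc']
      rw [hcnt]
      push_cast
      have : c - 1 - (t.count 0 : Int) = c - ((t.count 0 : Int) + 1) := by ring
      simp [this]
    · have hcnt : ((1 : Int) :: t).count 0 = t.count 0 := by simp
      have hc' : (t.count 0 : Int) ≤ c := by rw [hcnt] at hc; exact hc
      have hng : ¬ ((1 : Int) = 0 ∧ 0 < c) := by simp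
      simp only [List.cons_append, greedy, if_neg hng]
      rw [ih c (fun y hy => hb y (List.mem_cons_of_mem _ hy)) hc', hcnt]
      simp

-- ---- maximal run of ones ----
def leadOnes : List Int → Nat
  | [] => 0
  | x :: t => if x = 1 then leadOnes t + 1 else 0

def maxRunS : List Int → Nat
  | [] => 0
  | x :: t => max (leadOnes (x :: t)) (maxRunS t)

theorem leadOnes_le_maxRunS (t : List Int) : leadOnes t ≤ maxRunS t := by
  cases t with
  | nil => exact le_refl _
  | cons x t => exact le_max_left _ _

theorem leadOnes_le_length (t : List Int) : leadOnes t ≤ t.length := by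
  induction t with
  | nil => exact le_refl _
  | cons x t ih => simp only [leadOnes]; split <;> simp <;> omega

theorem pvCountMax_foldl (a : List Int) (mx temp : Int) (hmx : 0 ≤ mx) (htemp : 0 ≤ temp) :
    (fun s : Int × Int => if s.2 > s.1 then s.2 else s.1)
      (a.foldl (fun (st : Int × Int) e =>
        if e = 1 then (st.1, st.2 + 1)
        else (if st.2 > st.1 then st.2 else st.1, 0)) (mx, temp)) =
    max mx (max (temp + (leadOnes a : Int)) (maxRunS a : Int)) := by
  induction a generalizing mx temp with
  | nil => simp only [List.foldl_nil, leadOnes, maxRunS]; split <;> simp <;> omega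
  | cons x t ih =>
    by_cases hx : x = 1
    · rw [List.foldl_cons, if_pos hx, ih mx (temp + 1) hmx (by omega)]
      subst hx
      have h1 : leadOnes ((1 : Int) :: t) = leadOnes t + 1 := by simp [leadOnes]
      have h2 : maxRunS ((1 : Int) :: t) = max (leadOnes t + 1) (maxRunS t) := by
        rw [maxRunS, h1]
      rw [h1, h2]
      push_cast
      omega
    · rw [List.foldl_cons, if_neg hx,
        ih (if temp > mx then temp else mx) 0 (by split <;> omega) (le_refl _)]
      have h1 : leadOnes (x :: t) = 0 := by simp [leadOnes, hx]
      have h2 : maxRunS (x :: t) = max (leadOnes (x :: t)) (maxRunS t) := rfl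
      have h3 := leadOnes_le_maxRunS t
      rw [h1, h2, h1]
      push_cast
      split <;> omega

theorem pvCountMax_eq (a : List Int) : pvCountMax a = (maxRunS a : Int) := by
  have := pvCountMax_foldl a 0 0 (le_refl _) (le_refl _)
  have h3 := leadOnes_le_maxRunS a
  unfold pvCountMax
  dsimp only at this ⊢
  rw [this]
  push_cast
  omega

theorem leadOnes_append_ones (s v : List Int) (h1 : ∀ x ∈ s, x = 1) :
    s.length ≤ leadOnes (s ++ v) := by
  induction s with
  | nil => simp
  | cons x t ih =>
    have hx := h1 x List.mem_cons_self
    simp only [List.cons_append, leadOnes, if_pos hx, List.length_cons]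
    have := ih (fun y hy => h1 y (List.mem_cons_of_mem _ hy))
    omega

theorem maxRunS_append_left (u w : List Int) : maxRunS w ≤ maxRunS (u ++ w) := by
  induction u with
  | nil => simp
  | cons x u ih =>
    simp only [List.cons_append, maxRunS]
    exact le_trans ih (le_max_right _ _)

theorem maxRunS_ge (u s v : List Int) (h1 : ∀ x ∈ s, x = 1) :
    s.length ≤ maxRunS (u ++ s ++ v) := by
  calc s.length ≤ leadOnes (s ++ v) := leadOnes_append_ones s v h1
    _ ≤ maxRunS (s ++ v) := leadOnes_le_maxRunS _
    _ ≤ maxRunS (u ++ (s ++ v)) := maxRunS_append_left _ _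
    _ = maxRunS (u ++ s ++ v) := by rw [List.append_assoc]

theorem take_leadOnes_ones (l : List Int) : ∀ x ∈ l.take (leadOnes l), x = 1 := by
  induction l with
  | nil => simp
  | cons y t ih =>
    simp only [leadOnes]
    split
    · rename_i hy
      intro x hx
      rw [List.take_succ_cons] at hx
      rcases List.mem_cons.1 hx with rfl | hx
      · exact hy
      · exact ih x hx
    · simp

theorem maxRunS_achieved (a : List Int) :
    ∃ u s v, a = u ++ s ++ v ∧ (∀ x ∈ s, x = 1) ∧ s.length = maxRunS a := by
  induction a with
  | nil => exact ⟨[], [], [], rfl, by simp, rfl⟩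
  | cons x t ih =>
    by_cases hL : maxRunS t ≤ leadOnes (x :: t)
    · refine ⟨[], (x :: t).take (leadOnes (x :: t)), (x :: t).drop (leadOnes (x :: t)), ?_, ?_, ?_⟩
      · simp
      · exact take_leadOnes_ones (x :: t)
      · rw [List.length_take_of_le (leadOnes_le_length _)]
        rw [maxRunS]
        omega
    · obtain ⟨u, s, v, hdec, hones, hlen⟩ := ih
      refine ⟨x :: u, s, v, by simp [hdec], hones, ?_⟩
      rw [maxRunS]
      omega

-- ---- A-side: outer loop ----
theorem outer_ge_mx (array : List Int) (k : Int) (w : Nat) (mx : Int) :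
    mx ≤ pvOuter array k w mx := by
  fun_induction pvOuter array k w mx with
  | case1 w mx h w' hbrk => exact le_refl _
  | case2 w mx h w' hbrk c ih => exact le_trans (by dsimp only [c]; split <;> omega) ih
  | case3 w mx h => exact le_refl _

theorem skip_le_of_ne (array : List Int) (w p : Nat) (hwp : w ≤ p) (hp : p < array.length)
    (hne : array.getD p 0 ≠ 1) : pvSkip array w ≤ p := by
  fun_induction pvSkip array w with
  | case1 w h ih =>
    have hwne : w ≠ p := fun he => hne (he ▸ h.2)
    exact ih (by omega)
  | case2 w h => exact hwp

theorem outer_ge_candidate (array : List Int) (k : Int) (w : Nat) (mx : Int) (p : Nat)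
    (hwp : w ≤ p) (hp : p < array.length) (hne : array.getD p 0 ≠ 1) :
    pvCountMax (pvReplace array p 0 k) ≤ pvOuter array k w mx := by
  fun_induction pvOuter array k w mx with
  | case1 w mx h w' hbrk =>
    exact absurd (skip_le_of_ne array w p hwp hp hne) (by omega)
  | case2 w mx h w' hbrk c ih =>
    have hskip : pvSkip array w ≤ p := skip_le_of_ne array w p hwp hp hne
    by_cases hep : w' = p
    · subst hep
      refine le_trans ?_ (outer_ge_mx array k (w' + 1) _)
      dsimp only [c]
      split <;> omega
    · exact ih (by simp only [w'] at hep hskip ⊢; omega)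
  | case3 w mx h => omega

theorem zip_self_countP (l : List Int) : (l.zip l).countP (fun q => !(q.1 == q.2)) = 0 := by
  induction l with
  | nil => rfl
  | cons x t ih => simp [List.zip_cons_cons, List.countP_cons, ih]

theorem rel_binary (s s' : List Int) (h : List.Forall₂ pvRel s s') (h1 : ∀ y ∈ s', y = 1) :
    ∀ x ∈ s, x = 0 ∨ x = 1 := by
  induction h with
  | nil => simp
  | cons hr _ ih =>
    rename_i x y s s' _
    intro z hz
    rcases List.mem_cons.1 hz with rfl | hz
    · rcases hr with he | ⟨hz0, _⟩
      · exact Or.inr (he ▸ h1 y List.mem_cons_self)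
      · exact Or.inl hz0
    · exact ih (fun y hy => h1 y (List.mem_cons_of_mem _ hy)) z hz

theorem rel_count (s s' : List Int) (h : List.Forall₂ pvRel s s') (h1 : ∀ y ∈ s', y = 1) :
    s.count 0 ≤ (s.zip s').countP (fun q => !(q.1 == q.2)) := by
  induction h with
  | nil => simp
  | cons hr _ ih =>
    rename_i x y s s' _
    have hy1 : y = 1 := h1 y List.mem_cons_self
    have hrec := ih (fun z hz => h1 z (List.mem_cons_of_mem _ hz))
    subst hy1
    rw [List.count_cons, List.zip_cons_cons, List.countP_cons]
    by_cases hx : x = 0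
    · subst hx; simp; omega
    · simp [hx]; omega

theorem zip_drop' : ∀ (l₁ l₂ : List Int) (n : Nat),
    (l₁.zip l₂).drop n = (l₁.drop n).zip (l₂.drop n) := by
  intro l₁
  induction l₁ with
  | nil => simp
  | cons x t ih =>
    intro l₂ n
    cases l₂ with
    | nil => simp
    | cons y u =>
      cases n with
      | zero => simp
      | succ n => simpa using ih u n

theorem zip_take' : ∀ (l₁ l₂ : List Int) (n : Nat),
    (l₁.zip l₂).take n = (l₁.take n).zip (l₂.take n) := by
  intro l₁
  induction l₁ with
  | nil => simp
  | cons x t ih =>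
    intro l₂ n
    cases l₂ with
    | nil => simp
    | cons y u =>
      cases n with
      | zero => simp
      | succ n => simpa using ih u n

theorem replace_decomp (array : List Int) (k : Int) (p : Nat) (hp : p ≤ array.length) :
    pvReplace array p 0 k = array.take p ++ greedy (array.drop p) k := by
  have hlen : (array.take p).length = p := List.length_take_of_le hp
  have h := pvReplace_eq_greedy (array.drop p) (array.take p) 0 k
  rw [hlen, List.take_append_drop] at h
  rw [h]
  norm_num

theorem candidate_good (array : List Int) (k : Int) (p : Nat) (hp : p ≤ array.length) :
    ∃ m, Good array k m ∧ pvCountMax (pvReplace array p 0 k) = (m : Int) := by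
  rw [replace_decomp array k p hp]
  set T := array.take p ++ greedy (array.drop p) k with hT
  have hlen : (array.take p).length = p := List.length_take_of_le hp
  have hlenT : T.length = array.length := by
    rw [hT, List.length_append, hlen, length_greedy, List.length_drop]
    omega
  have hF : List.Forall₂ pvRel array T := by
    have h0 : List.Forall₂ pvRel (array.take p ++ array.drop p) T :=
      List.rel_append (List.forall₂_same.2 (fun x _ => (Or.inl rfl : pvRel x x)))
        (greedy_forall₂ (array.drop p) k)
    rwa [List.take_append_drop] at h0
  have hcc : ((array.zip T).countP (fun q => !(q.1 == q.2))) ≤ k.toNat := by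
    have h0 : (((array.take p ++ array.drop p)).zip T).countP (fun q => !(q.1 == q.2)) ≤ k.toNat := by
      rw [hT, List.zip_append rfl, List.countP_append, zip_self_countP]
      simpa using greedy_changed_le (array.drop p) k
    rwa [List.take_append_drop] at h0
  obtain ⟨u', s', v', hTdec, hs1, hslen⟩ := maxRunS_achieved T
  refine ⟨maxRunS T, ?_, pvCountMax_eq T⟩
  have him : u'.length + s'.length ≤ array.length := by
    rw [← hlenT, hTdec]
    simp
  set s : List Int := (array.drop u'.length).take s'.length with hs
  have hslen2 : s.length = s'.length := by
    rw [hs, List.length_take, List.length_drop]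
    omega
  have hTdrop : (T.drop u'.length).take s'.length = s' := by
    rw [hTdec, List.append_assoc, List.drop_left, List.take_left]
  have hF2 : List.Forall₂ pvRel s s' := by
    have h0 : List.Forall₂ pvRel ((array.drop u'.length).take s'.length)
        ((T.drop u'.length).take s'.length) :=
      List.forall₂_take _ (List.forall₂_drop _ hF)
    rw [hTdrop] at h0
    exact h0
  have hbin : ∀ x ∈ s, x = 0 ∨ x = 1 := rel_binary s s' hF2 hs1
  have hzip : s.zip s' = ((array.zip T).drop u'.length).take s'.length := by
    rw [zip_drop', zip_take', hs, hTdrop]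
  have hsub : (s.zip s').Sublist (array.zip T) := by
    rw [hzip]
    exact (List.take_sublist _ _).trans (List.drop_sublist _ _)
  have hcnt : s.count 0 ≤ k.toNat :=
    le_trans (rel_count s s' hF2 hs1) (le_trans (hsub.countP_le) hcc)
  refine ⟨s, ?_, by rw [hslen2, hslen], hbin, ?_⟩
  · refine ⟨array.take u'.length, array.drop (u'.length + s'.length), ?_⟩
    have hds : array.drop u'.length = s ++ array.drop (u'.length + s'.length) := by
      conv_lhs => rw [← List.take_append_drop s'.length (array.drop u'.length)]
      rw [List.drop_drop, ← hs]
    conv_rhs => rw [← List.take_append_drop u'.length array]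
    rw [hds, List.append_assoc]
  · calc ((s.count 0 : Int)) ≤ (k.toNat : Int) := by exact_mod_cast hcnt
      _ = max k 0 := Int.toNat_eq_max k
      _ ≤ max k 0 := le_refl _

theorem outer_good (array : List Int) (k : Int) (w : Nat) (mx : Int)
    (h : ∃ m, Good array k m ∧ mx = (m : Int)) :
    ∃ m, Good array k m ∧ pvOuter array k w mx = (m : Int) := by
  fun_induction pvOuter array k w mx with
  | case1 w mx h' w' hbrk => exact h
  | case2 w mx h' w' hbrk c ih =>
    refine ih ?_
    dsimp only [c]
    split
    · exact candidate_good array k w' (by omega)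
    · exact h
  | case3 w mx h' => exact h

theorem a_good (array : List Int) (k : Int) :
    ∃ m, Good array k m ∧ replace_zero_to_find_longest_continuous_ones array k = (m : Int) :=
  outer_good array k 0 0 ⟨0, good_zero array k, rfl⟩

theorem exists_first_zero (s : List Int) (hz : 0 < s.count 0) :
    ∃ s1 s2, s = s1 ++ (0 : Int) :: s2 ∧ (0 : Int) ∉ s1 := by
  induction s with
  | nil => simp at hz
  | cons x t ih =>
    by_cases hx : x = 0
    · exact ⟨[], t, by simp [hx], by simp⟩
    · have : 0 < t.count 0 := by
        rw [List.count_cons] at hz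
        simpa [hx] using hz
      obtain ⟨s1, s2, hdec, hno⟩ := ih this
      refine ⟨x :: s1, s2, by simp [hdec], ?_⟩
      intro hmem
      rcases List.mem_cons.1 hmem with h | h
      · exact hx h.symm
      · exact hno h

theorem rel_ones (s s' : List Int) (h : List.Forall₂ pvRel s s') (h1 : ∀ x ∈ s, x = 1) :
    ∀ y ∈ s', y = 1 := by
  induction h with
  | nil => simp
  | cons hr _ ih =>
    rename_i x y s s' _
    intro z hz
    rcases List.mem_cons.1 hz with rfl | hz
    · rcases hr with he | ⟨_, hz1⟩
      · exact he.trans (h1 x List.mem_cons_self)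
      · exact hz1
    · exact ih (fun w hw => h1 w (List.mem_cons_of_mem _ hw)) z hz

theorem replace_rel (array : List Int) (k : Int) (p : Nat) :
    List.Forall₂ pvRel array (array.take p ++ greedy (array.drop p) k) := by
  have h0 : List.Forall₂ pvRel (array.take p ++ array.drop p)
      (array.take p ++ greedy (array.drop p) k) :=
    List.rel_append (List.forall₂_same.2 (fun x _ => (Or.inl rfl : pvRel x x)))
      (greedy_forall₂ (array.drop p) k)
  rwa [List.take_append_drop] at h0

theorem T_length (array : List Int) (k : Int) (p : Nat) (hp : p ≤ array.length) :
    (array.take p ++ greedy (array.drop p) k).length = array.length := by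
  rw [List.length_append, List.length_take_of_le hp, length_greedy, List.length_drop]
  omega

theorem a_ge (array : List Int) (k : Int) (m : Nat)
    (hD : ¬ D_replace_zero_to_find_longest_continuous_ones array k) (h : Good array k m) :
    (m : Int) ≤ replace_zero_to_find_longest_continuous_ones array k := by
  obtain ⟨s, hinf, hlen, hbin, hcnt⟩ := h
  rcases Nat.eq_zero_or_pos m with rfl | hm
  · simpa using outer_ge_mx array k 0 0
  obtain ⟨u, v, huv⟩ := hinf
  by_cases hz : 0 < s.count 0
  · -- s contains a zero: start the replacement at its first zero
    obtain ⟨s1, s2, hdec, hno⟩ := exists_first_zero s hz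
    have hs1 : ∀ x ∈ s1, x = 1 := by
      intro x hx
      rcases hbin x (by rw [hdec]; exact List.mem_append_left _ hx) with rfl | h1
      · exact absurd hx hno
      · exact h1
    have harr : array = (u ++ s1) ++ (0 : Int) :: (s2 ++ v) := by
      rw [← huv, hdec]; simp
    set p := (u ++ s1).length with hpdef
    have hlens : s.length = s1.length + 1 + s2.length := by rw [hdec]; simp; omega
    have hp : p < array.length := by
      rw [harr]; simp [hpdef]
    have hget : array.getD p 0 = 0 := by
      rw [harr]; exact getD_append_len _ _ _ _
    have htake : array.take p = u ++ s1 := by rw [harr]; exact List.take_left ..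
    have hdrop : array.drop p = (0 : Int) :: (s2 ++ v) := by rw [harr]; exact List.drop_left ..
    have hcnt2 : ((0 : Int) :: s2).count 0 = s.count 0 := by
      rw [hdec, List.count_append]
      have : s1.count 0 = 0 := List.count_eq_zero.2 hno
      simp [this]
    have hck : (((0 : Int) :: s2).count 0 : Int) ≤ k := by
      rw [hcnt2]
      have := hcnt
      omega
    have hbin2 : ∀ x ∈ (0 : Int) :: s2, x = 0 ∨ x = 1 := by
      intro x hx
      rcases List.mem_cons.1 hx with rfl | hx
      · exact Or.inl rfl
      · exact hbin x (by rw [hdec]; exact List.mem_append_right _ (List.mem_cons_of_mem _ hx))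
    have hgreedy : greedy (((0 : Int) :: s2) ++ v) k =
        ((0 : Int) :: s2).map (fun _ => 1) ++ greedy v (k - (((0 : Int) :: s2).count 0 : Int)) :=
      greedy_prefix_ones _ v k hbin2 hck
    have hmid : ∀ x ∈ s1 ++ ((0 : Int) :: s2).map (fun _ => (1 : Int)), x = 1 := by
      intro x hx
      rcases List.mem_append.1 hx with hx | hx
      · exact hs1 x hx
      · obtain ⟨_, _, rfl⟩ := List.mem_map.1 hx; rfl
    have hT : pvReplace array p 0 k =
        u ++ (s1 ++ ((0 : Int) :: s2).map (fun _ => (1 : Int))) ++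
          greedy v (k - (((0 : Int) :: s2).count 0 : Int)) := by
      rw [replace_decomp array k p (le_of_lt hp), htake, hdrop]
      rw [show ((0 : Int) :: (s2 ++ v)) = ((0 : Int) :: s2) ++ v by simp, hgreedy]
      simp
    have hrun : (m : Int) ≤ pvCountMax (pvReplace array p 0 k) := by
      rw [hT, pvCountMax_eq]
      have := maxRunS_ge u (s1 ++ ((0 : Int) :: s2).map (fun _ => (1 : Int)))
        (greedy v (k - (((0 : Int) :: s2).count 0 : Int))) hmid
      have hml : (s1 ++ ((0 : Int) :: s2).map (fun _ => (1 : Int))).length = m := by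
        rw [← hlen]; simp [hlens]; omega
      rw [hml] at this
      exact_mod_cast this
    exact le_trans hrun
      (outer_ge_candidate array k 0 0 p (Nat.zero_le _) hp (by rw [hget]; norm_num))
  · -- s is all ones: any non-one position of the array will do
    have hones : ∀ x ∈ s, x = 1 := by
      intro x hx
      rcases hbin x hx with rfl | h1
      · exact absurd ((List.count_pos_iff).2 hx) hz
      · exact h1
    have hne : array ≠ [] := by
      intro he
      rw [he] at huv
      have hlen0 := congrArg List.length huv
      simp only [List.length_append, List.length_nil] at hlen0
      omega
    have hex : ∃ x ∈ array, x ≠ 1 := by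
      by_contra hall
      push_neg at hall
      exact hD ⟨hne, hall⟩
    obtain ⟨x, hxmem, hx1⟩ := hex
    obtain ⟨q, hq, hxq⟩ := List.getElem_of_mem hxmem
    have hgq : array.getD q 0 ≠ 1 := by
      rw [List.getD_eq_getElem _ _ hq, hxq]; exact hx1
    set T := array.take q ++ greedy (array.drop q) k with hTdef
    have hlenT : T.length = array.length := T_length array k q (le_of_lt hq)
    have hF : List.Forall₂ pvRel array T := replace_rel array k q
    have hsdrop : (array.drop u.length).take m = s := by
      rw [← huv, List.append_assoc, List.drop_left, ← hlen, List.take_left]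
    have hF2 : List.Forall₂ pvRel s ((T.drop u.length).take m) := by
      have h0 := List.forall₂_take m (List.forall₂_drop u.length hF)
      rwa [hsdrop] at h0
    set s'' : List Int := (T.drop u.length).take m with hs''
    have hs1 : ∀ y ∈ s'', y = 1 := rel_ones s s'' hF2 hones
    have humle : u.length + m ≤ array.length := by
      have := congrArg List.length huv
      simp at this
      omega
    have hs''len : s''.length = m := by
      rw [hs'', List.length_take, List.length_drop, hlenT]
      omega
    have hTdec : T = T.take u.length ++ s'' ++ T.drop (u.length + m) := by
      have hds : T.drop u.length = s'' ++ T.drop (u.length + m) := by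
        conv_lhs => rw [← List.take_append_drop m (T.drop u.length)]
        rw [List.drop_drop, ← hs'']
      conv_lhs => rw [← List.take_append_drop u.length T]
      rw [hds, List.append_assoc]
    have hrun : (m : Int) ≤ pvCountMax (pvReplace array q 0 k) := by
      rw [replace_decomp array k q (le_of_lt hq), ← hTdef, pvCountMax_eq]
      have := maxRunS_ge (T.take u.length) s'' (T.drop (u.length + m)) hs1
      rw [hs''len, ← hTdec] at this
      exact_mod_cast this
    exact le_trans hrun
      (outer_ge_candidate array k 0 0 q (Nat.zero_le _) hq hgq)

-- ---- D-side ----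
theorem skip_all_ones (array : List Int) (w : Nat) (h1 : ∀ x ∈ array, x = 1)
    (hw : w ≤ array.length) : pvSkip array w = array.length := by
  fun_induction pvSkip array w with
  | case1 w h ih => exact ih (by omega)
  | case2 w h =>
    by_cases hlt : w < array.length
    · exfalso
      apply h
      refine ⟨hlt, ?_⟩
      rw [List.getD_eq_getElem _ _ hlt]
      exact h1 _ (List.getElem_mem hlt)
    · omega

theorem a_on_D (array : List Int) (k : Int) (h1 : ∀ x ∈ array, x = 1) :
    replace_zero_to_find_longest_continuous_ones array k = 0 := by
  unfold replace_zero_to_find_longest_continuous_ones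
  rw [pvOuter]
  split
  · rw [if_pos]
    rw [skip_all_ones array 0 h1 (by omega)]
  · rfl

theorem alt_on_D (array : List Int) (k : Int) (h1 : ∀ x ∈ array, x = 1) :
    (array.length : Int) ≤ replace_zero_to_find_longest_continuous_ones_alt array k := by
  refine alt_ge array k array.length ⟨array, List.infix_refl _, rfl, fun x hx => Or.inr (h1 x hx), ?_⟩
  have : (0 : Int) ∉ array := fun h0 => by simpa using h1 0 h0
  simp [List.count_eq_zero.2 this]

-- ===== VERDICT (by name: the statement is the Claim_ definition above) =====
theorem replace_zero_to_find_longest_continuous_ones_spec : Claim_unchanged_replace_zero_to_find_longest_continuous_ones := by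
  intro array k _ hD
  obtain ⟨m, hm, he⟩ := a_good array k
  obtain ⟨m', hm', he'⟩ := alt_good array k
  have h1 := alt_ge array k m hm
  have h2 := a_ge array k m' hD hm'
  unfold Spec_replace_zero_to_find_longest_continuous_ones at *
  omega

theorem replace_zero_to_find_longest_continuous_ones_changed : Claim_changed_replace_zero_to_find_longest_continuous_ones := by
  unfold Claim_changed_replace_zero_to_find_longest_continuous_ones
  refine ⟨by decide, by decide, ?_, by decide, by decide⟩
  show replace_zero_to_find_longest_continuous_ones [1] 0 = 0
  exact a_on_D [1] 0 (by decide)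

theorem replace_zero_to_find_longest_continuous_ones_tight : Claim_exact_replace_zero_to_find_longest_continuous_ones := by
  intro array k _ hD
  obtain ⟨hne, h1⟩ := hD
  have hA := a_on_D array k h1
  have hB := alt_on_D array k h1
  have : array.length ≠ 0 := by simpa using hne
  omega
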